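-- pv_equiv track=rewrite | github.com/braincorp/auto_argparser | auto_argparser/src/auto_argparser/auto_argparser.py | separate_subargs_under_name
-- ===== SOURCE A (Python) =====
-- from typing import Sequence, Dict, Optional, Callable, Any, List, Tuple, Set, Union, Mapping
--
-- def separate_subargs_under_name(args: Sequence[str], name: str, short_name: Optional[str] = None) -> Tuple[Sequence[str], Sequence[str]]:
--     """
--     Separate out args with the given under the given name.  E.g.
--         separate_args_with_prefix(['--greeting',  'hello', '--person.name', 'Suzy', '--person.age', '30'], prefix='person')
--             == ['--name', 'Suzy', '--age', '30'], ['--greeting',  'hello']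
--     :param args:
--     :param name: The arg
--     :param short_name: Optionall, the shortened prefix, e.g. 'p'
--     :return:
--     """
--     keepers = []
--     remainders = []
--     last_was_keeper = False
--     for argstr in args:
--         is_argument_key = argstr.startswith('-') and len(argstr.lstrip('-.,0123456789')) != 0
--         if is_argument_key:
--             full_prefix = f'--{name}.'
--             short_prefix = f'-{short_name}.' if short_name is not None else None
--             if argstr.startswith(full_prefix):
--                 subarg = argstr[len(full_prefix):]
--                 keepers.append('--' + subarg)
--                 last_was_keeper = True
--             elif short_prefix is not None and argstr.startswith(short_prefix):
--                 subarg = argstr[len(short_prefix):]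
--                 keepers.append('--' + subarg)
--                 last_was_keeper = True
--             else:
--                 remainders.append(argstr)
--                 last_was_keeper = False
--         elif last_was_keeper:
--             keepers.append(argstr)
--             last_was_keeper = False
--         else:
--             remainders.append(argstr)
--
--     return keepers, remainders
-- ===== SOURCE B (Python) =====
-- def separate_subargs_under_name(args, name, short_name=None):
--     """Stateless re-implementation: classify each token from (predecessor, token)
--     pairs instead of carrying loop state; keepers/remainders via comprehensions."""
--     full = '--' + name + '.'
--     short = '-' + short_name + '.' if short_name is not None else None
--
--     def is_key(s):
--         return s.startswith('-') and len(s.lstrip('-.,0123456789')) != 0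
--
--     def match(s):
--         # rewritten sub-arg if s is a key under the namespace, else None
--         if not is_key(s):
--             return None
--         if s.startswith(full):
--             return '--' + s[len(full):]
--         if short is not None and s.startswith(short):
--             return '--' + s[len(short):]
--         return None
--
--     def kept(prev, tok):
--         m = match(tok)
--         if m is not None:
--             return m
--         if not is_key(tok) and prev is not None and match(prev) is not None:
--             return tok
--         return None
--
--     pairs = list(zip([None] + list(args), args))
--     keepers = [kept(p, a) for (p, a) in pairs if kept(p, a) is not None]
--     remainders = [a for (p, a) in pairs if kept(p, a) is None]
--     return keepers, remainders
-- ===== Notes on version B (the rewrite author's own statement) =====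
-- stated objective: alternative
-- what changed: Replaced A's stateful loop carrying a last_was_keeper flag by a stateless classification: each token is routed by a pure function of the (predecessor, token) pair built by zipping args with its shifted self, with keepers and remainders produced by two comprehensions.
import Mathlib
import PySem

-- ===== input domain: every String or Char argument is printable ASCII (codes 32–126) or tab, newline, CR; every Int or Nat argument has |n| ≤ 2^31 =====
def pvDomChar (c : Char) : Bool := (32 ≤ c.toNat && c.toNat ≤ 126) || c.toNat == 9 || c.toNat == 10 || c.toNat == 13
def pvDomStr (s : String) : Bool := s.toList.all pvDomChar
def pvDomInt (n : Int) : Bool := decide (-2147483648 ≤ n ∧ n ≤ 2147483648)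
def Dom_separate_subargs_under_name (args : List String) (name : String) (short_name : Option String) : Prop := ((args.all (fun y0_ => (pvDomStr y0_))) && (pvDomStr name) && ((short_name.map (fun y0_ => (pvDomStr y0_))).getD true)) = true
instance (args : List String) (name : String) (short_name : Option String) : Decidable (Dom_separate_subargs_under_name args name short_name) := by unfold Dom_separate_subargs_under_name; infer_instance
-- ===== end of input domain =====

-- B replaces A's stateful accumulator loop by a stateless classification of
-- (predecessor, token) pairs built with zip, routed by two filterMaps (objective: alternative decomposition).

-- ===== PORT A =====
-- hand port of Python's s.lstrip(chars): drop leading characters that occur in chars (exact)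
def pvLstripChars (s : List Char) (chars : List Char) : List Char :=
  s.dropWhile (fun c => chars.contains c)

-- argstr.startswith('-') and len(argstr.lstrip('-.,0123456789')) != 0
def pvIsArgKey (s : String) : Bool :=
  PySem.Str.startswith s "-" && (pvLstripChars s.toList "-.,0123456789".toList).length != 0

-- s[len(p):]  (slice from a nonnegative index; exact via PySem.List.slice)
def pvDropPrefix (s : String) (p : String) : String :=
  String.mk (PySem.List.slice s.toList (some ((p.toList.length : Int))) none)

-- the body of A's for-loop over (keepers, remainders, last_was_keeper)
def pvStepA (full_prefix : String) (short_prefix : Option String)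
    (st : List String × List String × Bool) (argstr : String) :
    List String × List String × Bool :=
  let keepers := st.1
  let remainders := st.2.1
  let last_was_keeper := st.2.2
  if pvIsArgKey argstr then
    if PySem.Str.startswith argstr full_prefix then
      (keepers ++ ["--" ++ pvDropPrefix argstr full_prefix], remainders, true)
    else
      match short_prefix with
      | some sp =>
        if PySem.Str.startswith argstr sp then
          (keepers ++ ["--" ++ pvDropPrefix argstr sp], remainders, true)
        else (keepers, remainders ++ [argstr], false)
      | none => (keepers, remainders ++ [argstr], false)
  else if last_was_keeper then
    (keepers ++ [argstr], remainders, false)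
  else
    (keepers, remainders ++ [argstr], last_was_keeper)

def separate_subargs_under_name (args : List String) (name : String) (short_name : Option String) : List String × List String :=
  let full_prefix := "--" ++ name ++ "."
  let short_prefix := short_name.map (fun sn => "-" ++ sn ++ ".")
  let st := args.foldl (pvStepA full_prefix short_prefix) ([], [], false)
  (st.1, st.2.1)

-- ===== PORT B =====
-- match(s): the rewritten sub-arg if s is a key under the namespace, else none
def pvMatch (full : String) (short? : Option String) (s : String) : Option String :=
  if !pvIsArgKey s then none
  else if PySem.Str.startswith s full then some ("--" ++ pvDropPrefix s full)
  else
    match short? with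
    | some sp => if PySem.Str.startswith s sp then some ("--" ++ pvDropPrefix s sp) else none
    | none => none

-- kept(prev, tok): what tok contributes to keepers given its predecessor, else none
def pvKept (full : String) (short? : Option String) (prev : Option String) (tok : String) : Option String :=
  match pvMatch full short? tok with
  | some m => some m
  | none =>
    if !pvIsArgKey tok && (match prev with
                           | some p => (pvMatch full short? p).isSome
                           | none => false) then some tok else none

def separate_subargs_under_name_alt (args : List String) (name : String) (short_name : Option String) : List String × List String :=
  let full := "--" ++ name ++ "."
  let short? := short_name.map (fun sn => "-" ++ sn ++ ".")
  let pairs := (none :: args.map some).zip args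
  (pairs.filterMap (fun pa => pvKept full short? pa.1 pa.2),
   pairs.filterMap (fun pa => if (pvKept full short? pa.1 pa.2).isSome then none else some pa.2))

-- ===== PRECONDITION & SPEC =====
def Spec_separate_subargs_under_name (args : List String) (name : String) (short_name : Option String) (out : List String × List String) : Prop := out = separate_subargs_under_name_alt args name short_name
instance (args : List String) (name : String) (short_name : Option String) (out : List String × List String) : Decidable (Spec_separate_subargs_under_name args name short_name out) := by unfold Spec_separate_subargs_under_name; infer_instance

-- ===== CLAIM (what is proved, stated in full; the proofs are below) =====
def Claim_equal_separate_subargs_under_name : Prop := ∀ (args : List String) (name : String) (short_name : Option String), Dom_separate_subargs_under_name args name short_name → Spec_separate_subargs_under_name args name short_name (separate_subargs_under_name args name short_name)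

-- ===== LEMMAS AND PROOFS =====
-- A's loop flag after processing a token: true iff that token was a matched key
def pvFlagOf (full : String) (short? : Option String) (prev : Option String) : Bool :=
  match prev with
  | some p => (pvMatch full short? p).isSome
  | none => false

-- one step of A's loop, expressed through B's pvKept classification
theorem pvStepA_eq (full : String) (short? : Option String) (k r : List String)
    (prev : Option String) (a : String) :
    pvStepA full short? (k, r, pvFlagOf full short? prev) a
      = (k ++ (pvKept full short? prev a).toList,
         r ++ (if (pvKept full short? prev a).isSome then [] else [a]),
         pvFlagOf full short? (some a)) := by
  cases short? with
  | none =>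
    by_cases hk : pvIsArgKey a <;>
      simp only [pvStepA, pvKept, pvMatch, pvFlagOf, hk, Bool.not_true, Bool.not_false] <;>
      split_ifs <;> simp_all [pvFlagOf, pvMatch]
  | some sp =>
    by_cases hk : pvIsArgKey a <;>
      simp only [pvStepA, pvKept, pvMatch, pvFlagOf, hk, Bool.not_true, Bool.not_false] <;>
      split_ifs <;> simp_all [pvFlagOf, pvMatch]

-- the pair list, recursively
def pvPairsFrom (prev : Option String) : List String → List (Option String × String)
  | [] => []
  | a :: t => (prev, a) :: pvPairsFrom (some a) t

theorem pvZip_eq_pairsFrom (l : List String) (prev : Option String) :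
    (prev :: l.map some).zip l = pvPairsFrom prev l := by
  induction l generalizing prev with
  | nil => rfl
  | cons a t ih => simp [pvPairsFrom, List.zip, ← ih (some a)]

theorem pvLoop_eq (full : String) (short? : Option String) (l : List String)
    (prev : Option String) (k r : List String) :
    (l.foldl (pvStepA full short?) (k, r, pvFlagOf full short? prev)).1
        = k ++ (pvPairsFrom prev l).filterMap (fun pa => pvKept full short? pa.1 pa.2)
    ∧ (l.foldl (pvStepA full short?) (k, r, pvFlagOf full short? prev)).2.1
        = r ++ (pvPairsFrom prev l).filterMap
            (fun pa => if (pvKept full short? pa.1 pa.2).isSome then none else some pa.2) := by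
  induction l generalizing prev k r with
  | nil => simp [pvPairsFrom]
  | cons a t ih =>
    rw [List.foldl_cons, pvStepA_eq full short? k r prev a]
    obtain ⟨h1, h2⟩ := ih (some a) (k ++ (pvKept full short? prev a).toList)
      (r ++ (if (pvKept full short? prev a).isSome then [] else [a]))
    constructor
    · rw [h1]; cases h : pvKept full short? prev a <;> simp [pvPairsFrom, h]
    · rw [h2]; cases h : pvKept full short? prev a <;> simp [pvPairsFrom, h]

-- ===== VERDICT (by name: the statement is the Claim_ definition above) =====
theorem separate_subargs_under_name_spec : Claim_equal_separate_subargs_under_name := by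
  intro args name short_name _
  unfold Spec_separate_subargs_under_name separate_subargs_under_name separate_subargs_under_name_alt
  rw [pvZip_eq_pairsFrom]
  have h := pvLoop_eq ("--" ++ name ++ ".") (short_name.map (fun sn => "-" ++ sn ++ "."))
    args none [] []
  simp only [pvFlagOf] at h
  exact Prod.ext h.1 h.2
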